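-- pv_equiv track=rewrite | github.com/enticies/AdventOfCode | 2021/8day/solution.py | find_five_three
-- ===== SOURCE A (Python) =====
-- def find_five_three(nonunique, c):
--     five = None
--     three = None
--     for a in c:
--         if c[a] == 8:
--             for l in nonunique:
--                 if a not in l:
--                     five = l
--                 else:
--                     three = l
--     return five, three
-- ===== SOURCE B (Python) =====
-- def find_five_three(nonunique, c):
--     # Search back-to-front: the answer in each slot is the last (key-with-count-8, line) hit.
--     eights = [a for a in c if c[a] == 8]
--
--     def last_hit(pred):
--         for a in reversed(eights):
--             for l in reversed(nonunique):
--                 if pred(a, l):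
--                     return l
--         return None
--
--     five = last_hit(lambda a, l: a not in l)
--     three = last_hit(lambda a, l: a in l)
--     return five, three
-- ===== Notes on version B (the rewrite author's own statement) =====
-- stated objective: alternative
-- what changed: A accumulates both answers by overwriting state across a nested forward double loop; B collects the count-8 keys once and finds each answer independently by a back-to-front search with early exit (first hit from the end = A's last overwrite).
import Mathlib
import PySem

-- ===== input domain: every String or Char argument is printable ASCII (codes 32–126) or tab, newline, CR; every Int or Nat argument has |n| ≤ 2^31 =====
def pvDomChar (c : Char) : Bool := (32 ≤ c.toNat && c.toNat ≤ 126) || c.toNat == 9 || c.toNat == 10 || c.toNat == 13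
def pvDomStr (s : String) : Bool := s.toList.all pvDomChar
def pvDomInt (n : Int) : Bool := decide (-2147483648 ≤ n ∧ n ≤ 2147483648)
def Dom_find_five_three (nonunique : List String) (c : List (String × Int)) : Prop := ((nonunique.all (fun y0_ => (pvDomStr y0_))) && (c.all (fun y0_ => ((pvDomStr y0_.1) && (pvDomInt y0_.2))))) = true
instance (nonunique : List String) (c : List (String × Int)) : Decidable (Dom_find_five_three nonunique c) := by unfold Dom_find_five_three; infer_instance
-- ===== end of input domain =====

-- B replaces A's state-overwriting nested loop by two independent back-to-front
-- searches with early exit (alternative decomposition, same worst-case cost).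

-- ===== PORT A =====
def find_five_three (nonunique : List String) (c : List (String × Int)) : Option String × Option String :=
  let d : PySem.Dict String Int := PySem.Dict.ofList c
  d.keys.foldl (fun (s : Option String × Option String) a =>
    if d.get? a == some 8 then
      nonunique.foldl (fun (s : Option String × Option String) l =>
        if !(PySem.Str.isIn a l) then (some l, s.2) else (s.1, some l)) s
    else s) (none, none)

-- ===== PORT B =====
-- Source B's last_hit: outer loop over reversed(eights), inner loop 'return first l
-- in reversed(nonunique) with pred a l' = nsRev.find? (pred a).
def altLastHit (pred : String → String → Bool) (nsRev : List String) : List String → Option String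
  | [] => none
  | a :: rest =>
    match nsRev.find? (fun l => pred a l) with
    | some l => some l
    | none => altLastHit pred nsRev rest

def find_five_three_alt (nonunique : List String) (c : List (String × Int)) : Option String × Option String :=
  let d : PySem.Dict String Int := PySem.Dict.ofList c
  let eights := d.keys.filter (fun a => d.get? a == some 8)
  let five := altLastHit (fun a l => !(PySem.Str.isIn a l)) nonunique.reverse eights.reverse
  let three := altLastHit (fun a l => PySem.Str.isIn a l) nonunique.reverse eights.reverse
  (five, three)

-- ===== PRECONDITION & SPEC =====
def Spec_find_five_three (nonunique : List String) (c : List (String × Int)) (out : Option String × Option String) : Prop := out = find_five_three_alt nonunique c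
instance (nonunique : List String) (c : List (String × Int)) (out : Option String × Option String) : Decidable (Spec_find_five_three nonunique c out) := by unfold Spec_find_five_three; infer_instance

-- ===== CLAIM (what is proved, stated in full; the proofs are below) =====
def Claim_equal_find_five_three : Prop := ∀ (nonunique : List String) (c : List (String × Int)), Dom_find_five_three nonunique c → Spec_find_five_three nonunique c (find_five_three nonunique c)

-- ===== LEMMAS AND PROOFS =====

theorem altLastHit_cons (pred : String → String → Bool) (nsRev : List String) (a : String) (rest : List String) :
    altLastHit pred nsRev (a :: rest)
      = Option.or (nsRev.find? (fun l => pred a l)) (altLastHit pred nsRev rest) := by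
  cases h : nsRev.find? (fun l => pred a l) <;> simp [altLastHit, h]

-- A's inner loop over nonunique, characterised by last-match-from-the-end.
theorem innerL (p q : String → Bool) (h : ∀ l, q l = !(p l)) (ns : List String)
    (s : Option String × Option String) :
    ns.foldl (fun (s : Option String × Option String) l =>
        if p l then (some l, s.2) else (s.1, some l)) s
    = (Option.or (ns.reverse.find? p) s.1, Option.or (ns.reverse.find? q) s.2) := by
  induction ns using List.reverseRecOn with
  | nil => simp
  | append_singleton n l ih =>
    rw [List.foldl_append]
    simp only [List.foldl_cons, List.foldl_nil, ih, List.reverse_append,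
      List.reverse_cons, List.reverse_nil, List.nil_append, List.singleton_append,
      List.find?_cons]
    cases hv : p l <;> simp [hv, h]

-- A's outer loop over the count-8 keys.
theorem mainL (p q : String → String → Bool) (h : ∀ a l, q a l = !(p a l))
    (nonunique : List String) (E : List String) (s : Option String × Option String) :
    E.foldl (fun (s : Option String × Option String) a =>
        nonunique.foldl (fun (s : Option String × Option String) l =>
          if p a l then (some l, s.2) else (s.1, some l)) s) s
    = (Option.or (altLastHit p nonunique.reverse E.reverse) s.1,
       Option.or (altLastHit q nonunique.reverse E.reverse) s.2) := by
  induction E using List.reverseRecOn with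
  | nil => simp [altLastHit]
  | append_singleton E' a ih =>
    rw [List.foldl_append]
    simp only [List.foldl_cons, List.foldl_nil]
    rw [innerL (p a) (q a) (h a), ih]
    simp [altLastHit_cons, Option.or_assoc]

-- ===== VERDICT (by name: the statement is the Claim_ definition above) =====
theorem find_five_three_spec : Claim_equal_find_five_three := by
  intro nonunique c _
  unfold Spec_find_five_three find_five_three find_five_three_alt
  rw [PySem.List.foldl_if_eq_foldl_filter,
    mainL (fun a l => !(PySem.Str.isIn a l)) (fun a l => PySem.Str.isIn a l)
      (fun a l => (Bool.not_not _).symm)]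
  simp
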